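-- pv_equiv track=rewrite | github.com/martinstiles/TDT4310-Master-Thesis-Recommendation-Tool | src/recommendation/recommender.py | get_thesis_id_of_relevant_docs
-- ===== SOURCE A (Python) =====
-- def get_thesis_id_of_relevant_docs(index_of_relevant_docs, english_theses):
--     thesis_id_of_relevant_docs = []
--     i = 0
--     for thesis_id in english_theses:
--         if i in index_of_relevant_docs:
--             thesis_id_of_relevant_docs.append(thesis_id)
--         i += 1
--     return thesis_id_of_relevant_docs
-- ===== SOURCE B (Python) =====
-- def get_thesis_id_of_relevant_docs(index_of_relevant_docs, english_theses):
--     n = len(english_theses)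
--     valid = sorted({j for j in index_of_relevant_docs if 0 <= j < n})
--     return [english_theses[j] for j in valid]
-- ===== Notes on version B (the rewrite author's own statement) =====
-- stated objective: faster
-- what changed: B iterates over the sorted, de-duplicated set of in-range indices and indexes into english_theses, instead of scanning every thesis with a running counter and an O(k) membership test per element.
import Mathlib
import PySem

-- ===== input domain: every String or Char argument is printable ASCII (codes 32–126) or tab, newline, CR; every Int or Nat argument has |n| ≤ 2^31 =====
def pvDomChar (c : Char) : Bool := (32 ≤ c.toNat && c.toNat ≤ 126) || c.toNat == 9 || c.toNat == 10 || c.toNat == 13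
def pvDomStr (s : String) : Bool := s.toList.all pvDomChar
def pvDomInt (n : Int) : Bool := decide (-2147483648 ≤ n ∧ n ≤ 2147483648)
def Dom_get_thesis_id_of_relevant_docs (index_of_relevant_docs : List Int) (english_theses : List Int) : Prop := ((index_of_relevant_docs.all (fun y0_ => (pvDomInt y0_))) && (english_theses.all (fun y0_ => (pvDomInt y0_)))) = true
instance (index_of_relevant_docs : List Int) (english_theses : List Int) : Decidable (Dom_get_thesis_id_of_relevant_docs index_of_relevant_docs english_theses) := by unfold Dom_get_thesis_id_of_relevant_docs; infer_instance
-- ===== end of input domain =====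

-- B replaces A's scan-every-thesis-with-a-counter loop by iterating the sorted de-duplicated
-- in-range indices and indexing into english_theses (objective: faster).

-- ===== PORT A =====
-- for thesis_id in english_theses: if i in index_of_relevant_docs: acc.append(thesis_id); i += 1
def get_thesis_id_of_relevant_docs (index_of_relevant_docs : List Int) (english_theses : List Int) : List Int :=
  (english_theses.foldl
    (fun (st : List Int × Int) thesis_id =>
      (if index_of_relevant_docs.contains st.2 then st.1 ++ [thesis_id] else st.1, st.2 + 1))
    ([], 0)).1

-- ===== PORT B =====
def get_thesis_id_of_relevant_docs_alt (index_of_relevant_docs : List Int) (english_theses : List Int) : List Int :=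
  let n : Int := PySem.List.len english_theses
  let valid : List Int :=
    PySem.List.sorted
      (PySem.Set.ofList (index_of_relevant_docs.filter (fun j => decide (0 ≤ j ∧ j < n))))
      (fun x => x) false
  -- english_theses[j]: j is in range here, so pyGetD is exact
  valid.map (fun j => PySem.List.pyGetD english_theses j 0)

-- ===== PRECONDITION & SPEC =====
def Spec_get_thesis_id_of_relevant_docs (index_of_relevant_docs : List Int) (english_theses : List Int) (out : List Int) : Prop := out = get_thesis_id_of_relevant_docs_alt index_of_relevant_docs english_theses
instance (index_of_relevant_docs : List Int) (english_theses : List Int) (out : List Int) : Decidable (Spec_get_thesis_id_of_relevant_docs index_of_relevant_docs english_theses out) := by unfold Spec_get_thesis_id_of_relevant_docs; infer_instance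

-- ===== CLAIM (what is proved, stated in full; the proofs are below) =====
def Claim_equal_get_thesis_id_of_relevant_docs : Prop := ∀ (index_of_relevant_docs : List Int) (english_theses : List Int), Dom_get_thesis_id_of_relevant_docs index_of_relevant_docs english_theses → Spec_get_thesis_id_of_relevant_docs index_of_relevant_docs english_theses (get_thesis_id_of_relevant_docs index_of_relevant_docs english_theses)

-- ===== LEMMAS AND PROOFS =====

-- A's loop, characterised via enumerate: it filters the enumerated list by index membership.
theorem pvA_fold (idx : List Int) (ts : List Int) (acc : List Int) (i : Int) :
    (ts.foldl
      (fun (st : List Int × Int) t =>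
        (if idx.contains st.2 then st.1 ++ [t] else st.1, st.2 + 1))
      (acc, i)).1
    = acc ++ ((PySem.List.enumerate ts i).filter (fun p => idx.contains p.1)).map (·.2) := by
  induction ts generalizing acc i with
  | nil => simp [PySem.List.enumerate_nil]
  | cons t ts ih =>
      simp only [List.foldl_cons, PySem.List.enumerate_cons, List.filter_cons]
      rw [ih]
      by_cases h : i ∈ idx
      · simp [h]
      · simp [h]

-- the matched indices, read off enumerate, are strictly increasing
theorem pvV_pairwise (idx : List Int) (ts : List Int) :
    ((((PySem.List.enumerate ts 0).filter (fun p => idx.contains p.1)).map (·.1)).Pairwise (· < ·)) := by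
  apply List.Pairwise.map
  · exact fun a b h => h
  · exact (PySem.List.pairwise_lt_enumerate ts 0).filter _

theorem pvV_mem (idx : List Int) (ts : List Int) (j : Int) :
    j ∈ (((PySem.List.enumerate ts 0).filter (fun p => idx.contains p.1)).map (·.1))
      ↔ j ∈ idx ∧ 0 ≤ j ∧ j < PySem.List.len ts := by
  simp only [List.mem_map, List.mem_filter, PySem.List.mem_enumerate_iff]
  constructor
  · rintro ⟨p, ⟨⟨k, hk, rfl⟩, hc⟩, rfl⟩
    simp only [PySem.List.len_eq]
    refine ⟨by simpa using hc, by omega, by omega⟩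
  · rintro ⟨hj, h0, hlt⟩
    rw [PySem.List.len_eq] at hlt
    refine ⟨(j, ts[j.toNat]'(by omega)), ⟨⟨j.toNat, by omega, by simp; omega⟩, by simpa⟩, rfl⟩

-- B's sorted valid-index list IS that strictly increasing list
theorem pvB_valid (idx : List Int) (ts : List Int) :
    PySem.List.sorted
      (PySem.Set.ofList (idx.filter (fun j => decide (0 ≤ j ∧ j < PySem.List.len ts))))
      (fun x => x) false
    = (((PySem.List.enumerate ts 0).filter (fun p => idx.contains p.1)).map (·.1)) := by
  apply PySem.List.sorted_eq_of_perm_of_pairwise_lt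
  · rw [List.perm_ext_iff_of_nodup]
    · intro j
      rw [pvV_mem, PySem.Set.mem_ofList]
      simp only [List.mem_filter, decide_eq_true_eq]
    · exact (pvV_pairwise idx ts).nodup
    · exact PySem.Set.nodup_ofList _
  · exact pvV_pairwise idx ts

-- ===== VERDICT (by name: the statement is the Claim_ definition above) =====
theorem get_thesis_id_of_relevant_docs_spec : Claim_equal_get_thesis_id_of_relevant_docs := by
  intro idx ts _
  show _ = _
  rw [get_thesis_id_of_relevant_docs, pvA_fold]
  simp only [get_thesis_id_of_relevant_docs_alt]
  rw [pvB_valid, List.map_map, List.nil_append]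
  apply List.map_congr_left
  intro p hp
  rw [List.mem_filter] at hp
  obtain ⟨k, hk, rfl⟩ := (PySem.List.mem_enumerate_iff _ _ _).mp hp.1
  simp [PySem.List.pyGetD_natCast, List.getElem?_eq_getElem hk]
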